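-- pv_equiv track=rewrite | github.com/Avitori73/copy_to | src/cp2/fuzzy_search.py | fuzzy_search_files
-- ===== SOURCE A (Python) =====
-- from typing import Dict, List, Tuple
--
-- def is_subsequence(query: str, text: str) -> bool:
--     """
--     检查query是否是text的子序列（保持字符顺序）
--     """
--     if not query:
--         return True
--     if not text:
--         return False
--
--     i = j = 0
--     query_lower = query.lower()
--     text_lower = text.lower()
--
--     while i < len(query_lower) and j < len(text_lower):
--         if query_lower[i] == text_lower[j]:
--             i += 1
--         j += 1
--
--     return i == len(query_lower)
--
-- def calculate_subsequence_score(query: str, text: str) -> int: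
--     """
--     计算子序列匹配的得分
--     """
--     if not is_subsequence(query, text):
--         return 0
--
--     query_lower = query.lower()
--     text_lower = text.lower()
--
--     # 基础得分
--     base_score = 60
--
--     # 计算字符间距离得分
--     positions = []
--     j = 0
--     for i, char in enumerate(query_lower):
--         while j < len(text_lower) and text_lower[j] != char:
--             j += 1
--         if j < len(text_lower):
--             positions.append(j)
--             j += 1
--
--     if len(positions) == len(query_lower):
--         # 计算平均间距
--         if len(positions) > 1:
--             total_distance = positions[-1] - positions[0]
--             ideal_distance = len(query_lower) - 1
--             if total_distance > 0:
--                 distance_ratio = ideal_distance / total_distance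
--                 distance_score = min(30, int(distance_ratio * 30))
--             else:
--                 distance_score = 30
--         else:
--             distance_score = 30
--
--         return base_score + distance_score
--
--     return 0
--
-- def fuzzy_search_files(
--     query: str, file_cache: Dict[str, str], max_results: int = 20
-- ) -> List[Tuple[str, str, int]]:
--     """
--     在文件缓存中进行模糊搜索
--     返回格式: [(filename, filepath, score), ...]
--     """
--     if not query:
--         return []
--
--     query_lower = query.lower()
--     results = []
--
--     for filename, filepath in file_cache.items():
--         filename_lower = filename.lower()
--         score = 0
--
--         # 精确匹配得分最高
--         if query_lower == filename_lower:
--             score = 100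
--         # 开头匹配
--         elif filename_lower.startswith(query_lower):
--             score = 90
--         # 包含匹配
--         elif query_lower in filename_lower:
--             score = 80
--         # 子序列匹配（保持字符顺序）
--         else:
--             score = calculate_subsequence_score(query, filename)
--
--         if score > 0:
--             results.append((filename, filepath, score))
--
--     # 按得分排序并限制结果数量
--     results.sort(key=lambda x: x[2], reverse=True)
--     return results[:max_results]
-- ===== SOURCE B (Python) =====
-- from typing import Dict, List, Tuple
--
--
-- def _score(q: str, f: str) -> int:
--     """Score one lowered filename f against lowered query q (q nonempty)."""
--     k = f.find(q)
--     if k == 0: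
--         return 100 if len(f) == len(q) else 90
--     if k > 0:
--         return 80
--     # greedy subsequence via successive find calls
--     first = pos = f.find(q[0])
--     for c in q[1:]:
--         pos = f.find(c, pos + 1)
--         if pos < 0:
--             return 0
--     if first < 0:
--         return 0
--     if len(q) == 1:
--         return 90
--     return 60 + min(30, (len(q) - 1) * 30 // (pos - first))
--
--
-- def fuzzy_search_files(
--     query: str, file_cache: Dict[str, str], max_results: int = 20
-- ) -> List[Tuple[str, str, int]]:
--     if not query:
--         return []
--     q = query.lower()
--     # bucket (counting) sort: scores lie in 60..100, buckets keep insertion order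
--     buckets = [[] for _ in range(41)]
--     for filename, filepath in file_cache.items():
--         s = _score(q, filename.lower())
--         if s > 0:
--             buckets[100 - s].append((filename, filepath, s))
--     out = []
--     for b in buckets:
--         out.extend(b)
--     return out[:max_results]
-- ===== Notes on version B (the rewrite author's own statement) =====
-- stated objective: faster
-- what changed: The comparison sort on scores is replaced by a counting/bucket sort over the finite score range 60..100 (insertion order inside each bucket reproduces the stable order); the tier ladder (equality/startswith/in) is replaced by one str.find dispatch on its index, and the three helper passes for the subsequence score are replaced by successive str.find(c, pos+1) calls keeping only the first and last match positions.
import Mathlib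
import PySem

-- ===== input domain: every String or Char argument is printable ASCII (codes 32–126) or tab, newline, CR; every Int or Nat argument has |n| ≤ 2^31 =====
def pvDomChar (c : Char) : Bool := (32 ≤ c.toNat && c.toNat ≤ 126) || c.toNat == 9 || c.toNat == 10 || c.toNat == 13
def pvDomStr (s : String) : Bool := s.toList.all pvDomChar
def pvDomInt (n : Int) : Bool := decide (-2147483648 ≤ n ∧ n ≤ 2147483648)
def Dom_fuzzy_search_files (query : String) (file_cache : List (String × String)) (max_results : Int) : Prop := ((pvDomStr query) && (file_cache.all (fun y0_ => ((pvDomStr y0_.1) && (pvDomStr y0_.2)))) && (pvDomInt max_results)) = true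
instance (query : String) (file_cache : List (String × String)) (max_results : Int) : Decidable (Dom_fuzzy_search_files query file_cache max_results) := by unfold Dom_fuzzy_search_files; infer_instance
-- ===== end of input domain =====

-- B replaces A's comparison sort by a counting/bucket sort over the finite score range 60..100,
-- the tier ladder by one str.find dispatch, and the three helper passes by successive find calls (faster).


-- ===== PORT A =====

-- while i < len(q) and j < len(t): if q[i] == t[j]: i += 1; j += 1   — returns the final i
def pvIsSubLoop (q : List Char) : List Char → Nat → Nat
  | [], i => i
  | c :: rest, i =>
    if i < q.length then
      pvIsSubLoop q rest (if q.getD i ' ' == c then i + 1 else i)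
    else i

def is_subsequence (query text : String) : Bool :=
  if query.toList = [] then true
  else if text.toList = [] then false
  else
    let query_lower := (PySem.Str.lower query).toList
    let text_lower := (PySem.Str.lower text).toList
    pvIsSubLoop query_lower text_lower 0 == query_lower.length

-- while j < len(t) and t[j] != char: j += 1   — number of skipped characters in the suffix
def pvSkip (c : Char) : List Char → Nat
  | [] => 0
  | x :: rest => if x == c then 0 else pvSkip c rest + 1

-- for i, char in enumerate(q): …skip…; if j < len(t): positions.append(j); j += 1
def pvPosLoop (t : List Char) : List Char → Nat → List Nat
  | [], _ => []
  | c :: rest, j =>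
    let j' := j + pvSkip c (t.drop j)
    if j' < t.length then j' :: pvPosLoop t rest (j' + 1)
    else pvPosLoop t rest j'

def calculate_subsequence_score (query text : String) : Int :=
  if !(is_subsequence query text) then 0
  else
    let query_lower := (PySem.Str.lower query).toList
    let text_lower := (PySem.Str.lower text).toList
    let positions := pvPosLoop text_lower query_lower 0
    if positions.length = query_lower.length then
      let distance_score : Int :=
        if positions.length > 1 then
          let total_distance : Int := (positions.getLastD 0 : Int) - (positions.headD 0 : Int)
          -- Python computes int(ideal/total*30) with floats; here 1 ≤ ideal ≤ total, where this
          -- truncation equals integer floor division (ideal*30)//total, used below.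
          if total_distance > 0 then
            min 30 (PySem.Int.floordiv (((query_lower.length : Int) - 1) * 30) total_distance)
          else 30
        else 30
      60 + distance_score
    else 0

def fuzzy_search_files (query : String) (file_cache : List (String × String)) (max_results : Int) : List (String × String × Int) :=
  if query.toList = [] then []
  else
    let query_lower := PySem.Str.lower query
    let results := file_cache.foldl (fun acc p =>
      let filename := p.1
      let filepath := p.2
      let filename_lower := PySem.Str.lower filename
      let score : Int :=
        if query_lower == filename_lower then 100
        else if PySem.Str.startswith filename_lower query_lower then 90
        else if PySem.Str.isIn query_lower filename_lower then 80
        else calculate_subsequence_score query filename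
      if score > 0 then acc ++ [(filename, filepath, score)] else acc) []
    let sorted := PySem.List.sorted results (fun x => x.2.2) true
    PySem.List.slice sorted none (some max_results)

-- ===== PORT B =====

-- for c in q[1:]: pos = f.find(c, pos + 1); if pos < 0: return 0   — none = that early return
def pvFindChain (f : List Char) : List Char → Int → Option Int
  | [], pos => some pos
  | c :: rest, pos =>
    let p := PySem.Chars.findFrom f [c] (pos + 1)
    if p < 0 then none else pvFindChain f rest p

-- _score(q, f) of Source B on the lowered character lists
def pvScoreAlt (q f : List Char) : Int :=
  let k := PySem.Chars.find f q
  if k = 0 then (if f.length = q.length then 100 else 90)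
  else if k > 0 then 80
  else
    match q with
    | [] => 0  -- unreachable: find f [] = 0, so k = 0 above (Python would index q[0])
    | c0 :: rest =>
      let first := PySem.Chars.find f [c0]
      match pvFindChain f rest first with
      | none => 0
      | some pos =>
        if first < 0 then 0
        else if q.length = 1 then 90
        else 60 + min 30 (PySem.Int.floordiv (((q.length : Int) - 1) * 30) (pos - first))

def fuzzy_search_files_alt (query : String) (file_cache : List (String × String)) (max_results : Int) : List (String × String × Int) :=
  if query.toList = [] then []
  else
    let q := PySem.Str.lower query
    -- buckets = [[] for _ in range(41)]; buckets[100 - s].append(...)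
    let buckets : List (List (String × String × Int)) := List.replicate 41 []
    let buckets := file_cache.foldl (fun bks p =>
      let s := pvScoreAlt q.toList (PySem.Str.lower p.1).toList
      if s > 0 then bks.modify (100 - s).toNat (fun b => b ++ [(p.1, p.2, s)]) else bks) buckets
    let out := buckets.foldl (fun acc b => acc ++ b) []
    PySem.List.slice out none (some max_results)

-- ===== PRECONDITION & SPEC =====
def Spec_fuzzy_search_files (query : String) (file_cache : List (String × String)) (max_results : Int) (out : List (String × String × Int)) : Prop := out = fuzzy_search_files_alt query file_cache max_results
instance (query : String) (file_cache : List (String × String)) (max_results : Int) (out : List (String × String × Int)) : Decidable (Spec_fuzzy_search_files query file_cache max_results out) := by unfold Spec_fuzzy_search_files; infer_instance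

-- ===== CLAIM (what is proved, stated in full; the proofs are below) =====
def Claim_equal_fuzzy_search_files : Prop := ∀ (query : String) (file_cache : List (String × String)) (max_results : Int), Dom_fuzzy_search_files query file_cache max_results → Spec_fuzzy_search_files query file_cache max_results (fuzzy_search_files query file_cache max_results)

-- ===== LEMMAS AND PROOFS =====

-- canonical greedy match positions: one pass over the text, consuming the query
def scanPos : List Char → List Char → Nat → List Nat
  | _, [], _ => []
  | [], _ :: _, _ => []
  | c :: qr, x :: tr, j => if x = c then j :: scanPos qr tr (j + 1) else scanPos (c :: qr) tr (j + 1)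

theorem scanPos_nil_left (t : List Char) (j : Nat) : scanPos [] t j = [] := by
  cases t <;> simp [scanPos]

theorem scanPos_le_mem (q t : List Char) (j : Nat) (x : Nat) (hx : x ∈ scanPos q t j) : j ≤ x := by
  induction t generalizing q j with
  | nil => simp [scanPos] at hx
  | cons c tr ih =>
    cases q with
    | nil => simp [scanPos] at hx
    | cons a qr =>
      simp only [scanPos] at hx
      split at hx
      · rcases List.mem_cons.mp hx with h | h
        · omega
        · have := ih qr (j + 1) h; omega
      · have := ih (a :: qr) (j + 1) hx; omega

theorem scanPos_pairwise (q t : List Char) (j : Nat) : (scanPos q t j).Pairwise (· < ·) := by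
  induction t generalizing q j with
  | nil => simp [scanPos]
  | cons c tr ih =>
    cases q with
    | nil => simp [scanPos_nil_left]
    | cons a qr =>
      simp only [scanPos]
      split
      · exact List.Pairwise.cons (fun x hx => by have := scanPos_le_mem qr tr (j + 1) x hx; omega) (ih qr (j + 1))
      · exact ih (a :: qr) (j + 1)

theorem scanPos_length_indep (q t : List Char) (j j' : Nat) :
    (scanPos q t j).length = (scanPos q t j').length := by
  induction t generalizing q j j' with
  | nil => simp [scanPos]
  | cons c tr ih =>
    cases q with
    | nil => simp [scanPos_nil_left]
    | cons a qr =>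
      simp only [scanPos]
      split
      · simpa using ih qr (j + 1) (j' + 1)
      · exact ih (a :: qr) (j + 1) (j' + 1)

theorem scanPos_nil_right (q : List Char) (j : Nat) : scanPos q [] j = [] := by
  cases q <;> simp [scanPos]

-- A's is_subsequence loop counts exactly the greedy matches
theorem pvIsSubLoop_eq (q : List Char) (t : List Char) (i : Nat) (hi : i ≤ q.length) :
    pvIsSubLoop q t i = i + (scanPos (q.drop i) t 0).length := by
  induction t generalizing i with
  | nil => simp [pvIsSubLoop, scanPos_nil_right]
  | cons c tr ih =>
    by_cases h : i < q.length
    · have hdrop : q.drop i = q[i] :: q.drop (i + 1) := List.drop_eq_getElem_cons h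
      have hget : q.getD i ' ' = q[i] := by
        simp [List.getD_eq_getElem?_getD, List.getElem?_eq_getElem h]
      by_cases hc : q[i] = c
      · have h1 : pvIsSubLoop q (c :: tr) i = pvIsSubLoop q tr (i + 1) := by
          rw [pvIsSubLoop, if_pos h, hget]; simp [hc]
        have h2 : scanPos (q.drop i) (c :: tr) 0 = 0 :: scanPos (q.drop (i + 1)) tr 1 := by
          rw [hdrop]; simp [scanPos, hc]
        rw [h1, ih (i + 1) (by omega), h2]
        rw [scanPos_length_indep (q.drop (i + 1)) tr 0 1]
        simp; omega
      · have h1 : pvIsSubLoop q (c :: tr) i = pvIsSubLoop q tr i := by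
          rw [pvIsSubLoop, if_pos h, hget]; simp [hc]
        have h2 : scanPos (q.drop i) (c :: tr) 0 = scanPos (q.drop i) tr 1 := by
          rw [hdrop]; simp [scanPos, Ne.symm hc]
        rw [h1, ih i (by omega), h2, scanPos_length_indep (q.drop i) tr 1 0]
    · have hieq : i = q.length := by omega
      rw [pvIsSubLoop, if_neg h]
      simp [hieq, scanPos_nil_left]

theorem pvSkip_le (c : Char) (s : List Char) : pvSkip c s ≤ s.length := by
  induction s with
  | nil => simp [pvSkip]
  | cons x rest ih => simp only [pvSkip]; split <;> simp; omega

-- scanPos (c :: qr) decomposed by the first occurrence of c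
theorem scanPos_cons_skip (c : Char) (qr s : List Char) (j : Nat) :
    scanPos (c :: qr) s j =
      if pvSkip c s < s.length then
        (j + pvSkip c s) :: scanPos qr (s.drop (pvSkip c s + 1)) (j + pvSkip c s + 1)
      else [] := by
  induction s generalizing j with
  | nil => simp [scanPos, pvSkip]
  | cons x rest ih =>
    simp only [scanPos, pvSkip]
    by_cases hx : x == c
    · have : x = c := beq_iff_eq.mp hx
      simp [this]
    · have hne : ¬ x = c := fun h => hx (beq_iff_eq.mpr h)
      rw [if_neg hne, if_neg hx, ih (j + 1)]
      by_cases hlt : pvSkip c rest < rest.length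
      · rw [if_pos hlt, if_pos (by simp; omega)]
        simp [List.drop_succ_cons]
        constructor
        · omega
        · congr 1; omega
      · rw [if_neg hlt, if_neg (by simp; omega)]

-- A's positions loop computes the greedy match positions
theorem pvPosLoop_eq (t : List Char) (q : List Char) (j : Nat) (hj : j ≤ t.length) :
    pvPosLoop t q j = scanPos q (t.drop j) j := by
  induction q generalizing j with
  | nil => simp [pvPosLoop, scanPos_nil_left]
  | cons c qr ih =>
    have hlen : (t.drop j).length = t.length - j := by simp
    have hsk := pvSkip_le c (t.drop j)
    simp only [pvPosLoop, scanPos_cons_skip, hlen]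
    by_cases h : j + pvSkip c (t.drop j) < t.length
    · rw [if_pos h, if_pos (by omega)]
      rw [ih (j + pvSkip c (t.drop j) + 1) (by omega)]
      rw [List.drop_drop]
      have harr : j + pvSkip c (t.drop j) + 1 = j + (pvSkip c (t.drop j) + 1) := by omega
      rw [harr]
    · rw [if_neg h, if_neg (by omega)]
      have hjl : j + pvSkip c (t.drop j) = t.length := by omega
      rw [ih (j + pvSkip c (t.drop j)) (by omega), hjl]
      simp [scanPos_nil_right]

theorem headD_lt_getLastD (l : List Nat) (h2 : 2 ≤ l.length) (hp : l.Pairwise (· < ·)) :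
    l.headD 0 < l.getLastD 0 := by
  match l, h2 with
  | a :: b :: rs, _ =>
    have hmem : (b :: rs).getLast (by simp) ∈ b :: rs := List.getLast_mem _
    have ha := (List.pairwise_cons.mp hp).1 _ hmem
    simpa [List.getLastD_eq_getLast?, List.getLast?_eq_some_getLast] using ha

-- pvSkip is the index of the first occurrence
theorem pvSkip_lt_iff_mem (c : Char) (s : List Char) : pvSkip c s < s.length ↔ c ∈ s := by
  induction s with
  | nil => simp [pvSkip]
  | cons x rest ih =>
    cases hxc : x == c with
    | true =>
      have : x = c := beq_iff_eq.mp hxc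
      simp [pvSkip, this]
    | false =>
      have hne : ¬ c = x := fun h => by subst h; simp at hxc
      simp only [pvSkip, hxc, Bool.false_eq_true, if_false, List.length_cons, List.mem_cons]
      rw [Nat.add_lt_add_iff_right, ih]
      simp [hne]

theorem pvSkip_prefix (c : Char) (s : List Char) (h : pvSkip c s < s.length) :
    [c] <+: s.drop (pvSkip c s) := by
  induction s with
  | nil => simp at h
  | cons x rest ih =>
    cases hxc : x == c with
    | true =>
      have : x = c := beq_iff_eq.mp hxc
      simp [pvSkip, this]
    | false =>
      simp only [pvSkip, hxc, Bool.false_eq_true, if_false, List.length_cons] at h ⊢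
      simpa using ih (by omega)

theorem pvSkip_min (c : Char) (s : List Char) (i : Nat) (hi : i < pvSkip c s) :
    ¬ ([c] <+: s.drop i) := by
  induction s generalizing i with
  | nil => simp [pvSkip] at hi
  | cons x rest ih =>
    cases hxc : x == c with
    | true => simp [pvSkip, hxc] at hi
    | false =>
      simp only [pvSkip, hxc, Bool.false_eq_true, if_false] at hi
      cases i with
      | zero =>
        intro hp
        have : x = c := by
          rcases hp with ⟨t, ht⟩
          simpa using congrArg (·.head?) ht.symm
        simp [this] at hxc
      | succ n => simpa using ih n (by omega)

-- f.find(c) for a single character c is the pvSkip index (or -1)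
theorem find_singleton (c : Char) (s : List Char) :
    PySem.Chars.find s [c] = if pvSkip c s < s.length then (pvSkip c s : Int) else -1 := by
  by_cases h : pvSkip c s < s.length
  · rw [if_pos h]
    have hinf : [c] <:+: s := (pvSkip_prefix c s h).isInfix.trans (List.drop_suffix _ _).isInfix
    have hnn : 0 ≤ PySem.Chars.find s [c] := (PySem.Chars.find_nonneg_iff s [c]).mpr hinf
    obtain ⟨hpre, hmin⟩ := PySem.Chars.find_spec hnn
    have h1 : ¬ ((PySem.Chars.find s [c]).toNat < pvSkip c s) := fun hlt => pvSkip_min c s _ hlt hpre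
    have h2 : ¬ (pvSkip c s < (PySem.Chars.find s [c]).toNat) := fun hlt => hmin _ hlt (pvSkip_prefix c s h)
    omega
  · rw [if_neg h]
    have hmem : ¬ c ∈ s := fun hm => h ((pvSkip_lt_iff_mem c s).mpr hm)
    rw [PySem.Chars.find_eq_neg_one_iff]
    intro hinf
    exact hmem (by
      rcases hinf with ⟨p, sfx, hps⟩
      rw [← hps]; simp)

-- find = 0 exactly on prefixes
theorem find_eq_zero_iff (s sub : List Char) : PySem.Chars.find s sub = 0 ↔ sub <+: s := by
  constructor
  · intro h0
    have := (PySem.Chars.find_spec (s := s) (sub := sub) (by omega)).1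
    simpa [h0] using this
  · intro hp
    have hnn : 0 ≤ PySem.Chars.find s sub :=
      (PySem.Chars.find_nonneg_iff s sub).mpr hp.isInfix
    obtain ⟨_, hmin⟩ := PySem.Chars.find_spec hnn
    by_contra hne
    exact hmin 0 (by omega) (by simpa using hp)

-- the find-chain walks exactly the tail of the greedy scan
theorem pvFindChain_eq (f : List Char) (rest : List Char) (pos : Int)
    (h1 : -1 ≤ pos) (h2 : pos + 1 ≤ (f.length : Int)) :
    pvFindChain f rest pos =
      (if (scanPos rest (f.drop (pos + 1).toNat) (pos + 1).toNat).length = rest.length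
       then some (((scanPos rest (f.drop (pos + 1).toNat) (pos + 1).toNat).getLast?.map
                    (fun n => (n : Int))).getD pos)
       else none) := by
  induction rest generalizing pos with
  | nil => simp [pvFindChain, scanPos_nil_left]
  | cons c rs ih =>
    have hm : (pos + 1).toNat ≤ f.length := by omega
    set m := (pos + 1).toNat with hmdef
    have hcast : pos + 1 = (m : Int) := by omega
    have hff := PySem.Chars.findFrom_natCast f [c] m hm
    rw [find_singleton] at hff
    have hplen : (f.drop m).length = f.length - m := by simp
    have hnorm : (f.drop m).drop (pvSkip c (f.drop m) + 1) = f.drop (m + pvSkip c (f.drop m) + 1) := by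
      rw [List.drop_drop]; congr 1
    have hscan := scanPos_cons_skip c rs (f.drop m) m
    rw [hnorm] at hscan
    by_cases hlt : pvSkip c (f.drop m) < (f.drop m).length
    · set k := pvSkip c (f.drop m) with hk
      rw [if_pos hlt] at hscan
      rw [if_pos hlt, if_neg (by omega : ¬ ((k : Int) = -1))] at hff
      have hp : PySem.Chars.findFrom f [c] (pos + 1) = (m : Int) + k := by rw [hcast]; exact hff
      have hstep : pvFindChain f (c :: rs) pos = pvFindChain f rs ((m : Int) + k) := by
        simp only [pvFindChain, hp]
        rw [if_neg (by omega)]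
      rw [hstep, ih ((m : Int) + k) (by omega) (by omega)]
      have htn : ((m : Int) + k + 1).toNat = m + k + 1 := by omega
      rw [htn, hscan]
      set T := scanPos rs (f.drop (m + k + 1)) (m + k + 1) with hT
      by_cases hlen : T.length = rs.length
      · rw [if_pos hlen, if_pos (by simpa using hlen)]
        congr 1
        cases hsp : T with
        | nil => simp
        | cons a l =>
          rw [List.getLast?_cons_cons]
          obtain ⟨g, hg⟩ := Option.isSome_iff_exists.mp
            (List.getLast?_isSome.mpr (by simp : (a :: l) ≠ ([] : List Nat)))
          rw [hg]
          simp
      · rw [if_neg hlen, if_neg (by simpa using hlen)]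
    · rw [if_neg hlt] at hscan
      rw [if_neg hlt, if_pos rfl] at hff
      have hp : PySem.Chars.findFrom f [c] (pos + 1) = -1 := by rw [hcast]; exact hff
      have hstep : pvFindChain f (c :: rs) pos = none := by
        simp only [pvFindChain, hp]
        rw [if_pos (by omega)]
      rw [hstep, hscan]
      rw [if_neg (by simp)]

-- A's score else-branch equals B's find-chain else-branch (on the lowered lists)
theorem score_core (c0 : Char) (rest tl : List Char) :
    (if !(if tl = [] then false else (pvIsSubLoop (c0 :: rest) tl 0 == (c0 :: rest).length)) then (0 : Int)
     else
       if (pvPosLoop tl (c0 :: rest) 0).length = (c0 :: rest).length then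
         60 + (if (pvPosLoop tl (c0 :: rest) 0).length > 1 then
                 (if ((pvPosLoop tl (c0 :: rest) 0).getLastD 0 : Int) - ((pvPosLoop tl (c0 :: rest) 0).headD 0 : Int) > 0 then
                    min 30 (PySem.Int.floordiv ((((c0 :: rest).length : Int) - 1) * 30)
                      (((pvPosLoop tl (c0 :: rest) 0).getLastD 0 : Int) - ((pvPosLoop tl (c0 :: rest) 0).headD 0 : Int)))
                  else 30)
               else 30)
       else 0)
    = (match pvFindChain tl rest (PySem.Chars.find tl [c0]) with
       | none => (0 : Int)
       | some pos =>
         if PySem.Chars.find tl [c0] < 0 then 0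
         else if (c0 :: rest).length = 1 then 90
         else 60 + min 30 (PySem.Int.floordiv ((((c0 :: rest).length : Int) - 1) * 30)
                            (pos - PySem.Chars.find tl [c0]))) := by
  have hsub := pvIsSubLoop_eq (c0 :: rest) tl 0 (by omega)
  have hpos := pvPosLoop_eq tl (c0 :: rest) 0 (by omega)
  simp only [List.drop_zero, Nat.zero_add] at hsub hpos
  have hs0 := scanPos_cons_skip c0 rest tl 0
  simp only [Nat.zero_add] at hs0
  have hfind0 := find_singleton c0 tl
  by_cases hsk : pvSkip c0 tl < tl.length
  · rw [if_pos hsk] at hs0 hfind0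
    set k0 := pvSkip c0 tl with hk0
    have htlne : tl ≠ [] := by intro h; rw [h] at hsk; simp at hsk
    have hchain := pvFindChain_eq tl rest (k0 : Int) (by omega) (by omega)
    have htn : ((k0 : Int) + 1).toNat = k0 + 1 := by omega
    rw [htn] at hchain
    set T := scanPos rest (tl.drop (k0 + 1)) (k0 + 1) with hT
    rw [if_neg htlne, hfind0, hpos, hsub, hs0]
    by_cases hfull : T.length = rest.length
    · rw [if_pos hfull] at hchain
      simp only [hchain]
      rw [if_neg (by omega : ¬ ((k0 : Int) < 0))]
      have hbeq : ((k0 :: T).length == (c0 :: rest).length) = true := by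
        simp [hfull]
      simp only [hbeq, Bool.not_true, Bool.false_eq_true, if_false]
      rw [if_pos (by simp [hfull])]
      cases hrest : rest with
      | nil =>
        have hTnil : T = [] := by
          rw [hT, hrest]; exact scanPos_nil_left _ _
        rw [hTnil]
        norm_num
      | cons c1 rs =>
        have hTlen : T.length = rs.length + 1 := by rw [hfull, hrest]; rfl
        have hTne : T ≠ [] := by intro h; rw [h] at hTlen; simp at hTlen
        obtain ⟨g, hg⟩ := Option.isSome_iff_exists.mp (List.getLast?_isSome.mpr hTne)
        have hgl : (k0 :: T).getLastD 0 = g := by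
          rw [List.getLastD_cons, List.getLastD_eq_getLast?, hg]; rfl
        have hpair : (k0 :: T).Pairwise (· < ·) := by
          rw [← hs0]; exact scanPos_pairwise _ _ _
        have hglt : k0 < g := by
          have h2 : 2 ≤ (k0 :: T).length := by simp [hTlen]
          have hh := headD_lt_getLastD (k0 :: T) h2 hpair
          rw [show (k0 :: T).headD 0 = k0 from rfl, hgl] at hh
          exact hh
        rw [if_neg (by simp : ¬ (c0 :: c1 :: rs).length = 1)]
        rw [if_pos (by simp [hTlen] : (k0 :: T).length > 1)]
        rw [hgl, show (k0 :: T).headD 0 = k0 from rfl]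
        rw [if_pos (by omega : ((g : Nat) : Int) - ((k0 : Nat) : Int) > 0)]
        simp [hg]
    · rw [if_neg hfull] at hchain
      simp only [hchain]
      have hbeq : ((k0 :: T).length == (c0 :: rest).length) = false := by
        simp [hfull]
      simp only [hbeq, Bool.not_false]
      rfl
  · rw [if_neg hsk] at hs0 hfind0
    have hchain := pvFindChain_eq tl rest (-1) (by omega) (by omega)
    have h0 : ((-1 : Int) + 1).toNat = 0 := by omega
    rw [h0, List.drop_zero] at hchain
    have hA : (if tl = [] then false else (pvIsSubLoop (c0 :: rest) tl 0 == (c0 :: rest).length)) = false := by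
      by_cases htl : tl = []
      · simp [htl]
      · rw [if_neg htl, hsub, hs0]
        simp
    rw [hA, hfind0, hchain]
    by_cases hlen : (scanPos rest tl 0).length = rest.length
    · rw [if_pos hlen]
      simp
    · rw [if_neg hlen]
      simp

-- per-item: A's tier ladder + helper equals B's _score on the lowered lists
theorem score_alt_eq (query filename : String) (hq : query.toList ≠ []) :
    (if PySem.Str.lower query == PySem.Str.lower filename then (100 : Int)
     else if PySem.Str.startswith (PySem.Str.lower filename) (PySem.Str.lower query) then 90
     else if PySem.Str.isIn (PySem.Str.lower query) (PySem.Str.lower filename) then 80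
     else calculate_subsequence_score query filename)
    = pvScoreAlt (PySem.Str.lower query).toList (PySem.Str.lower filename).toList := by
  have hqlne : (PySem.Str.lower query).toList ≠ [] := by
    simp [PySem.Str.toList_lower, PySem.Chars.lower, hq]
  by_cases heq : PySem.Str.lower query = PySem.Str.lower filename
  · rw [if_pos (by simp [heq])]
    have hleq : (PySem.Str.lower query).toList = (PySem.Str.lower filename).toList := by rw [heq]
    have hk : PySem.Chars.find (PySem.Str.lower filename).toList (PySem.Str.lower query).toList = 0 :=
      (find_eq_zero_iff _ _).mpr (hleq ▸ List.prefix_refl _)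
    simp only [pvScoreAlt, hk]
    simp [hleq]
  · rw [if_neg (by simp [heq])]
    by_cases hpre : (PySem.Str.lower query).toList <+: (PySem.Str.lower filename).toList
    · have hsw : PySem.Str.startswith (PySem.Str.lower filename) (PySem.Str.lower query) = true := by
        simp only [PySem.Str.startswith_eq]
        exact (PySem.Chars.startswith_iff _ _).mpr hpre
      rw [if_pos hsw]
      have hk : PySem.Chars.find (PySem.Str.lower filename).toList (PySem.Str.lower query).toList = 0 :=
        (find_eq_zero_iff _ _).mpr hpre
      have hlenne : ¬ (PySem.Str.lower filename).toList.length = (PySem.Str.lower query).toList.length := by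
        intro hlen
        exact heq (String.toList_inj.mp (hpre.eq_of_length hlen.symm))
      simp only [pvScoreAlt, hk]
      rw [if_neg hlenne]
      simp
    · have hswf : PySem.Str.startswith (PySem.Str.lower filename) (PySem.Str.lower query) = false := by
        rw [Bool.eq_false_iff]
        intro hsw
        exact hpre ((PySem.Chars.startswith_iff _ _).mp (by simpa only [PySem.Str.startswith_eq] using hsw))
      rw [if_neg (by rw [hswf]; exact Bool.false_ne_true)]
      by_cases hin : (PySem.Str.lower query).toList <:+: (PySem.Str.lower filename).toList
      · have hii : PySem.Str.isIn (PySem.Str.lower query) (PySem.Str.lower filename) = true :=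
          (PySem.Str.isIn_iff_infix _ _).mpr hin
        rw [if_pos hii]
        have hge : 0 ≤ PySem.Chars.find (PySem.Str.lower filename).toList (PySem.Str.lower query).toList :=
          (PySem.Chars.find_nonneg_iff _ _).mpr hin
        have hne0 : ¬ PySem.Chars.find (PySem.Str.lower filename).toList (PySem.Str.lower query).toList = 0 :=
          fun h0 => hpre ((find_eq_zero_iff _ _).mp h0)
        simp only [pvScoreAlt]
        rw [if_neg hne0, if_pos (by omega)]
      · have hii : PySem.Str.isIn (PySem.Str.lower query) (PySem.Str.lower filename) = false := by
          rw [Bool.eq_false_iff]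
          intro h
          exact hin ((PySem.Str.isIn_iff_infix _ _).mp h)
        rw [if_neg (by rw [hii]; exact Bool.false_ne_true)]
        have hk : PySem.Chars.find (PySem.Str.lower filename).toList (PySem.Str.lower query).toList = -1 :=
          (PySem.Chars.find_eq_neg_one_iff _ _).mpr hin
        obtain ⟨c0, rest, hqc⟩ : ∃ c0 rest, (PySem.Str.lower query).toList = c0 :: rest := by
          cases h : (PySem.Str.lower query).toList with
          | nil => exact absurd h hqlne
          | cons a l => exact ⟨a, l, rfl⟩
        have htl : filename.toList = [] ↔ (PySem.Str.lower filename).toList = [] := by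
          simp [PySem.Str.toList_lower, PySem.Chars.lower]
        have hcore := score_core c0 rest (PySem.Str.lower filename).toList
        rw [hqc] at hk
        simp only [pvScoreAlt, hqc, hk]
        norm_num
        by_cases ht : filename.toList = []
        · rw [if_pos (htl.mp ht)] at hcore
          simp only [calculate_subsequence_score, is_subsequence, if_neg hq, if_pos ht, hqc]
          simpa using hcore
        · rw [if_neg (fun hh => ht (htl.mpr hh))] at hcore
          simp only [calculate_subsequence_score, is_subsequence, if_neg hq, if_neg ht, hqc]
          simpa using hcore

-- A's subsequence score is 0 or between 60 and 90
theorem calc_range (query filename : String) :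
    calculate_subsequence_score query filename = 0 ∨
      (60 ≤ calculate_subsequence_score query filename ∧
       calculate_subsequence_score query filename ≤ 90) := by
  simp only [calculate_subsequence_score]
  split_ifs with g1 g2 g3 g4
  · exact Or.inl rfl
  · right
    have hnn : 0 ≤ PySem.Int.floordiv
        ((((PySem.Str.lower query).toList.length : Int) - 1) * 30)
        (((pvPosLoop (PySem.Str.lower filename).toList (PySem.Str.lower query).toList 0).getLastD 0 : Int) -
         ((pvPosLoop (PySem.Str.lower filename).toList (PySem.Str.lower query).toList 0).headD 0 : Int)) := by
      rw [PySem.Int.floordiv_eq_ediv_of_pos g4]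
      refine Int.ediv_nonneg (mul_nonneg ?_ (by norm_num)) (le_of_lt g4)
      have h1 : 1 ≤ (PySem.Str.lower query).toList.length := by omega
      omega
    omega
  · right; omega
  · right; omega
  · exact Or.inl rfl

-- the positive values of A's per-item score lie in 60..100
theorem score_a_range (query filename : String) :
    0 < (if PySem.Str.lower query == PySem.Str.lower filename then (100 : Int)
         else if PySem.Str.startswith (PySem.Str.lower filename) (PySem.Str.lower query) then 90
         else if PySem.Str.isIn (PySem.Str.lower query) (PySem.Str.lower filename) then 80
         else calculate_subsequence_score query filename) →
    60 ≤ (if PySem.Str.lower query == PySem.Str.lower filename then (100 : Int)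
          else if PySem.Str.startswith (PySem.Str.lower filename) (PySem.Str.lower query) then 90
          else if PySem.Str.isIn (PySem.Str.lower query) (PySem.Str.lower filename) then 80
          else calculate_subsequence_score query filename) ∧
    (if PySem.Str.lower query == PySem.Str.lower filename then (100 : Int)
     else if PySem.Str.startswith (PySem.Str.lower filename) (PySem.Str.lower query) then 90
     else if PySem.Str.isIn (PySem.Str.lower query) (PySem.Str.lower filename) then 80
     else calculate_subsequence_score query filename) ≤ 100 := by
  intro h
  rcases calc_range query filename with hc | hc <;> split_ifs at h ⊢ <;> omega

theorem foldl_append_flatten {α : Type} (l : List (List α)) (a : List α) :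
    l.foldl (fun acc b => acc ++ b) a = a ++ l.flatten := by
  induction l generalizing a with
  | nil => simp
  | cons b rest ih => simp [ih, List.append_assoc]

-- insertBy skips a prefix it does not go before
theorem insertBy_append_left {α : Type} (before : α → α → Bool) (x : α) (b l : List α)
    (hb : ∀ y ∈ b, before x y = false) :
    PySem.List.insertBy before x (b ++ l) = b ++ PySem.List.insertBy before x l := by
  induction b with
  | nil => simp
  | cons y ys ih =>
    have hy : before x y = false := hb y (by simp)
    simp only [List.cons_append, PySem.List.insertBy, hy]
    simp [ih (fun z hz => hb z (by simp [hz]))]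

theorem insertBy_all_before {α : Type} (before : α → α → Bool) (x : α) (l : List α)
    (hl : ∀ y ∈ l, before x y = true) :
    PySem.List.insertBy before x l = x :: l := by
  cases l with
  | nil => simp [PySem.List.insertBy]
  | cons y ys => simp [PySem.List.insertBy, hl y (by simp)]

-- appending into the bucket of score s is insertBy into the flattened buckets
theorem bucket_insert (bs : List (List (String × String × Int))) (t : Int)
    (x : String × String × Int) (s : Int) (hx : x.2.2 = s)
    (hlo : t - ((bs.length : Int) - 1) ≤ s) (hhi : s ≤ t)
    (hinv : ∀ i (h : i < bs.length), ∀ y ∈ bs[i], y.2.2 = t - (i : Int)) :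
    (bs.modify (t - s).toNat (fun b => b ++ [x])).flatten
      = PySem.List.insertBy (fun a b => decide (b.2.2 < a.2.2)) x bs.flatten := by
  induction bs generalizing t with
  | nil => simp at hlo hhi; omega
  | cons b rest ih =>
    have hbkey : ∀ y ∈ b, y.2.2 = t := by
      intro y hy; simpa using hinv 0 (by simp) y hy
    have hrest : ∀ i (h : i < rest.length), ∀ y ∈ rest[i], y.2.2 = (t - 1) - (i : Int) := by
      intro i h y hy
      have := hinv (i + 1) (by simp; omega) y (by simpa using hy)
      push_cast at this ⊢
      omega
    have hrflat : ∀ y ∈ rest.flatten, y.2.2 < t := by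
      intro y hy
      rw [List.mem_flatten] at hy
      rcases hy with ⟨l, hl, hyl⟩
      rcases List.mem_iff_getElem.mp hl with ⟨i, hilt, rfl⟩
      have := hrest i hilt y hyl
      omega
    by_cases hst : s = t
    · have h0 : (t - s).toNat = 0 := by omega
      rw [h0]
      rw [show (b :: rest).modify 0 (fun bl => bl ++ [x]) = (b ++ [x]) :: rest from rfl]
      rw [List.flatten_cons, List.flatten_cons]
      rw [insertBy_append_left _ _ b _ (fun y hy => by
        simp [hbkey y hy, hx, hst])]
      rw [insertBy_all_before _ _ _ (fun y hy => by
        simp [hx, hst]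
        exact hrflat y hy)]
      simp
    · have hslt : s ≤ t - 1 := by omega
      have hsucc : (t - s).toNat = ((t - 1) - s).toNat + 1 := by omega
      rw [hsucc]
      rw [show (b :: rest).modify (((t - 1) - s).toNat + 1) (fun bl => bl ++ [x])
            = b :: rest.modify ((t - 1) - s).toNat (fun bl => bl ++ [x]) from rfl]
      rw [List.flatten_cons, List.flatten_cons]
      rw [insertBy_append_left _ _ b _ (fun y hy => by
        simp [hbkey y hy]
        omega)]
      rw [ih (t - 1) (by simp only [List.length_cons] at hlo; push_cast at hlo ⊢; omega) hslt hrest]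

-- main loop invariant: flattened buckets = the insertion-sorted results
theorem main_fold (g : String × String → Int)
    (hg : ∀ p, 0 < g p → 60 ≤ g p ∧ g p ≤ 100) (cache : List (String × String)) :
    ∀ (bks : List (List (String × String × Int))) (res : List (String × String × Int)),
      bks.length = 41 →
      (∀ i (h : i < bks.length), ∀ y ∈ bks[i], y.2.2 = 100 - (i : Int)) →
      bks.flatten = res.foldl (fun acc x => PySem.List.insertBy (fun a b => decide (b.2.2 < a.2.2)) x acc) [] →
      (cache.foldl (fun bks p =>
          if g p > 0 then bks.modify (100 - g p).toNat (fun b => b ++ [(p.1, p.2, g p)]) else bks) bks).flatten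
        = (cache.foldl (fun acc p => if g p > 0 then acc ++ [(p.1, p.2, g p)] else acc) res).foldl
            (fun acc x => PySem.List.insertBy (fun a b => decide (b.2.2 < a.2.2)) x acc) [] := by
  induction cache with
  | nil => intro bks res _ _ h; simpa using h
  | cons p rest ih =>
    intro bks res hlen hinv hflat
    simp only [List.foldl_cons]
    by_cases hp : g p > 0
    · rw [if_pos hp, if_pos hp]
      obtain ⟨h60, h100⟩ := hg p hp
      apply ih
      · simp [hlen]
      · intro i hilt y hy
        rw [List.length_modify] at hilt
        rw [List.getElem_modify] at hy
        split at hy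
        · rcases List.mem_append.mp hy with h | h
          · exact hinv i (by omega) y h
          · simp at h
            subst h
            simp
            omega
        · exact hinv i (by omega) y hy
      · rw [List.foldl_append]
        simp only [List.foldl_cons, List.foldl_nil]
        rw [← hflat]
        exact bucket_insert bks 100 (p.1, p.2, g p) (g p) rfl (by rw [hlen]; push_cast; omega) (by omega) hinv
    · rw [if_neg hp, if_neg hp]
      exact ih bks res hlen hinv hflat

-- ===== VERDICT (by name: the statement is the Claim_ definition above) =====
theorem fuzzy_search_files_spec : Claim_equal_fuzzy_search_files := by
  unfold Claim_equal_fuzzy_search_files Spec_fuzzy_search_files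
  intro query file_cache max_results _
  unfold fuzzy_search_files fuzzy_search_files_alt
  by_cases hq : query.toList = []
  · simp [hq]
  · rw [if_neg hq, if_neg hq]
    have hsr := fun filename => score_alt_eq query filename hq
    simp only [hsr]
    congr 1
    rw [PySem.List.sorted_rev_eq_foldl_insertBy]
    rw [foldl_append_flatten, List.nil_append]
    refine (main_fold (fun p => pvScoreAlt (PySem.Str.lower query).toList (PySem.Str.lower p.1).toList)
      (fun p hp => ?_) file_cache (List.replicate 41 []) []
      (by simp) (by intro i h y hy; rw [List.getElem_replicate] at hy; cases hy) (by simp)).symm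
    have hp' : 0 < pvScoreAlt (PySem.Str.lower query).toList (PySem.Str.lower p.1).toList := hp
    rw [← hsr p.1] at hp'
    have hr := score_a_range query p.1 hp'
    rw [hsr p.1] at hr
    exact hr
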